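-- pv_equiv track=rewrite | github.com/zzz136454872/leetcode | minNumBooths.py | minNumBooths
-- ===== SOURCE A (Python) =====
-- from collections import defaultdict
-- from typing import List
--
-- def minNumBooths(demand: List[str]) -> int:
--     a = defaultdict(int)
--
--     for d in demand:
--         tmp = defaultdict(int)
--
--         for letter in d:
--             tmp[letter] += 1
--
--         for k in tmp:
--             a[k] = max(tmp[k], a[k])
--
--     return sum(a.values())
-- ===== SOURCE B (Python) =====
-- def minNumBooths(demand):
--     # invert the nesting: one pass to collect the distinct characters,
--     # then a running max of per-string counts for each character
--     chars = set()
--     for s in demand: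
--         chars.update(s)
--     total = 0
--     for c in chars:
--         best = 0
--         for s in demand:
--             best = max(best, s.count(c))
--         total += best
--     return total
-- ===== Notes on version B (the rewrite author's own statement) =====
-- stated objective: alternative
-- what changed: A builds a per-string frequency dict for every string and merges them into a global dict by taking maxima, then sums its values; B never builds any dict: it collects the set of distinct characters in one pass and then, per character, takes a running max of s.count(c) over the strings and sums those maxima.
import Mathlib
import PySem

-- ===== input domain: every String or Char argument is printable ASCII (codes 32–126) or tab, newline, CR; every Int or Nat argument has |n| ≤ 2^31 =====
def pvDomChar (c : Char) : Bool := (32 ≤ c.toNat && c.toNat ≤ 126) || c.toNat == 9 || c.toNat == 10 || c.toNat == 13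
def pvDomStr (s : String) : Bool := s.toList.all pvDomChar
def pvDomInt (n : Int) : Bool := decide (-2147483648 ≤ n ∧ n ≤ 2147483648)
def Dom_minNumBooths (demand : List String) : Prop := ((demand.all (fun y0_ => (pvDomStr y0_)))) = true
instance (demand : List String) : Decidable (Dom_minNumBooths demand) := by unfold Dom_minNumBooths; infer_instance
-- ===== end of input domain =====

-- B inverts the loop nesting: instead of A's per-string frequency dicts merged by max into a
-- global dict, B collects the distinct characters once and sums a per-character running max
-- of s.count(c) over the strings (alternative decomposition, no dicts; not claimed faster).

-- ===== PORT A =====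
def minNumBooths (demand : List String) : Int :=
  (demand.foldl (fun a d =>
      let tmp : PySem.Dict Char Int :=
        d.toList.foldl (fun t letter => t.modify letter 0 (· + 1)) PySem.Dict.empty
      tmp.keys.foldl (fun a k => a.insert k (max (tmp.getD k 0) (a.getD k 0))) a)
    PySem.Dict.empty).values.sum

-- ===== PORT B =====
def minNumBooths_alt (demand : List String) : Int :=
  let chars : PySem.Set Char :=
    demand.foldl (fun ch s => PySem.Set.update ch s.toList) PySem.Set.empty
  chars.foldl (fun total c =>
    total + demand.foldl (fun best s => max best ((PySem.Str.count s (String.ofList [c]) : Int))) 0) 0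

-- ===== PRECONDITION & SPEC =====
def Spec_minNumBooths (demand : List String) (out : Int) : Prop := out = minNumBooths_alt demand
instance (demand : List String) (out : Int) : Decidable (Spec_minNumBooths demand out) := by unfold Spec_minNumBooths; infer_instance

-- ===== CLAIM (what is proved, stated in full; the proofs are below) =====
def Claim_equal_minNumBooths : Prop := ∀ (demand : List String), Dom_minNumBooths demand → Spec_minNumBooths demand (minNumBooths demand)

-- ===== LEMMAS AND PROOFS =====

/-- The distinct characters of the strings of `l`, in first-appearance order
(this is also the list B's port folds over). -/
def pvCharsOf (l : List String) : PySem.Set Char :=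
  l.foldl (fun ch s => PySem.Set.update ch s.toList) PySem.Set.empty

/-- Running max (starting at 0) of the per-string counts of character `c` over `l`. -/
def pvMOf (l : List String) (c : Char) : Int :=
  l.foldl (fun b s => max b (s.toList.count c : Int)) 0

/-- The dict whose keys are `S` (in that order) with values given by `m`. -/
def pvMapOver (S : List Char) (m : Char → Int) : PySem.Dict Char Int :=
  ⟨S.map (fun c => (c, m c))⟩

theorem pvGetD_mapOver (S : List Char) (m : Char → Int) (k : Char) :
    (pvMapOver S m).getD k 0 = if k ∈ S then m k else 0 := by
  induction S with
  | nil => simp [pvMapOver, PySem.Dict.getD, PySem.Dict.get?]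
  | cons x t ih =>
    by_cases hxk : x = k
    · subst hxk
      simp [pvMapOver, PySem.Dict.getD, PySem.Dict.get?]
    · have h1 : (pvMapOver (x :: t) m).getD k 0 = (pvMapOver t m).getD k 0 := by
        simp [pvMapOver, PySem.Dict.getD, PySem.Dict.get?, hxk]
      rw [h1, ih]
      simp [List.mem_cons, Ne.symm hxk]

theorem pvKeys_mapOver (S : List Char) (m : Char → Int) :
    (pvMapOver S m).keys = S := by
  simp [pvMapOver, PySem.Dict.keys, Function.comp_def]

theorem pvContains_mapOver (S : List Char) (m : Char → Int) (k : Char) :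
    (pvMapOver S m).contains k = decide (k ∈ S) := by
  rw [PySem.Dict.contains_eq_decide_mem_keys, pvKeys_mapOver]

theorem pvInsert_mapOver (S : List Char) (m : Char → Int) (k : Char) (v : Int) :
    (pvMapOver S m).insert k v = pvMapOver (PySem.Set.add S k) (fun c => if c = k then v else m c) := by
  by_cases hk : k ∈ S
  · have hc : (pvMapOver S m).contains k = true := by
      rw [pvContains_mapOver]; simpa using hk
    have hs : PySem.Set.contains S k = true := by
      simp [PySem.Set.contains, hk]
    simp only [pvMapOver] at hc ⊢
    simp only [PySem.Dict.insert, hc, if_true, PySem.Set.add, hs, List.map_map]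
    congr 1
    apply List.map_congr_left
    intro c _
    by_cases hck : c = k
    · subst hck; simp
    · simp [hck, Function.comp]
  · have hc : (pvMapOver S m).contains k = false := by
      rw [pvContains_mapOver]; simpa using hk
    have hs : PySem.Set.contains S k = false := by
      simp [PySem.Set.contains, hk]
    simp only [pvMapOver] at hc ⊢
    simp only [PySem.Dict.insert, hc, Bool.false_eq_true, if_false, PySem.Set.add, hs,
      List.map_append, List.map_cons, List.map_nil, if_true]
    congr 1
    congr 1
    apply List.map_congr_left
    intro c hcS
    have hck : c ≠ k := fun h => hk (h ▸ hcS)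
    simp [hck]

theorem pvMOf_nonneg (l : List String) (c : Char) : 0 ≤ pvMOf l c :=
  (PySem.List.le_foldl_max_int l (fun s => (s.toList.count c : Int)) 0).1

theorem pvMOf_append (l : List String) (d : String) (c : Char) :
    pvMOf (l ++ [d]) c = max (pvMOf l c) (d.toList.count c : Int) := by
  simp [pvMOf, List.foldl_append]

theorem pvCharsOf_append (l : List String) (d : String) :
    pvCharsOf (l ++ [d]) = (pvCharsOf l).update d.toList := by
  simp [pvCharsOf, List.foldl_append]

theorem pvMem_charsOf_aux (l : List String) :
    ∀ (S : PySem.Set Char) (c : Char),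
      c ∈ l.foldl (fun ch s => PySem.Set.update ch s.toList) S ↔ c ∈ S ∨ ∃ s ∈ l, c ∈ s.toList := by
  induction l with
  | nil => intro S c; simp
  | cons d t ih =>
    intro S c
    rw [List.foldl_cons, ih, PySem.Set.mem_update]
    constructor
    · rintro ((h | h) | ⟨s, hs, hc⟩)
      · exact Or.inl h
      · exact Or.inr ⟨d, by simp, h⟩
      · exact Or.inr ⟨s, by simp [hs], hc⟩
    · rintro (h | ⟨s, hs, hc⟩)
      · exact Or.inl (Or.inl h)
      · rcases List.mem_cons.mp hs with h1 | h1
        · exact Or.inl (Or.inr (h1 ▸ hc))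
        · exact Or.inr ⟨s, h1, hc⟩

theorem pvMem_charsOf (l : List String) (c : Char) :
    c ∈ pvCharsOf l ↔ ∃ s ∈ l, c ∈ s.toList := by
  rw [pvCharsOf, pvMem_charsOf_aux]
  simp [PySem.Set.empty]

theorem pvMOf_zero (l : List String) (c : Char) (h : ∀ s ∈ l, c ∉ s.toList) : pvMOf l c = 0 := by
  induction l using List.reverseRecOn with
  | nil => simp [pvMOf]
  | append_singleton l d ih =>
    rw [pvMOf_append]
    have hd : c ∉ d.toList := h d (by simp)
    rw [List.count_eq_zero.mpr hd]
    rw [ih (fun s hs => h s (by simp [hs]))]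
    simp

theorem pvUpdate_ofList {α : Type} [BEq α] [LawfulBEq α] (S : PySem.Set α) (xs : List α) :
    PySem.Set.update S (PySem.Set.ofList xs) = PySem.Set.update S xs := by
  rw [PySem.Set.update_eq_append_filter, PySem.Set.update_eq_append_filter,
    PySem.Set.ofList_ofList]

theorem pvCount_go (c : Char) :
    ∀ (s : List Char) (fuel acc : Nat), s.length ≤ fuel →
      PySem.Chars.count.go [c] fuel s acc = acc + s.count c := by
  intro s
  induction s with
  | nil =>
    intro fuel acc _
    cases fuel <;> simp [PySem.Chars.count.go]
  | cons h t ih =>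
    intro fuel acc hle
    cases fuel with
    | zero => simp at hle
    | succ f =>
      rw [PySem.Chars.count.go]
      by_cases hch : c = h
      · subst hch
        rw [show List.isPrefixOf [c] (c :: t) = true by simp [List.isPrefixOf]]
        rw [if_pos rfl]
        rw [show List.drop [c].length (c :: t) = t from rfl]
        rw [ih f (acc + 1) (Nat.le_of_succ_le_succ hle)]
        simp
        omega
      · have hpf : (List.isPrefixOf [c] (h :: t)) = false := by
          simp [List.isPrefixOf, hch]
        rw [hpf]
        simp only [Bool.false_eq_true, if_false]
        rw [ih f acc (Nat.le_of_succ_le_succ hle)]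
        simp [Ne.symm hch]

theorem pvCount_singleton (s : List Char) (c : Char) :
    PySem.Chars.count s [c] = s.count c := by
  rw [PySem.Chars.count]
  rw [if_neg (by simp)]
  rw [pvCount_go c s s.length 0 le_rfl]
  exact Nat.zero_add _

theorem pvMergeA (cnt : Char → Int) (ks : List Char) (hks : ks.Nodup) :
    ∀ (S : List Char) (m : Char → Int), (∀ c, c ∉ S → m c = 0) →
    ks.foldl (fun a k => a.insert k (max (cnt k) (a.getD k 0))) (pvMapOver S m) =
      pvMapOver (PySem.Set.update S ks) (fun c => if c ∈ ks then max (cnt c) (m c) else m c) := by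
  induction ks with
  | nil =>
    intro S m _
    simp [PySem.Set.update, pvMapOver]
  | cons k ks ih =>
    intro S m h0
    have hknotin : k ∉ ks := (List.nodup_cons.mp hks).1
    have hksnd : ks.Nodup := (List.nodup_cons.mp hks).2
    rw [List.foldl_cons]
    have hval : max (cnt k) ((pvMapOver S m).getD k 0) = max (cnt k) (m k) := by
      rw [pvGetD_mapOver]
      by_cases hkS : k ∈ S
      · simp [hkS]
      · simp [hkS, h0 k hkS]
    rw [hval, pvInsert_mapOver]
    rw [ih hksnd (PySem.Set.add S k) _ ?h0']
    case h0' =>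
      intro c hc
      rw [PySem.Set.mem_add] at hc
      have hcS : c ∉ S := fun h => hc (Or.inl h)
      have hck : c ≠ k := fun h => hc (Or.inr h)
      simp [hck, h0 c hcS]
    rw [PySem.Set.update_cons]
    congr 1
    funext c
    by_cases hcks : c ∈ ks
    · have hck : c ≠ k := fun h => hknotin (h ▸ hcks)
      simp [hcks, hck, List.mem_cons]
    · by_cases hck : c = k
      · subst hck
        simp [hcks, List.mem_cons]
      · simp [hcks, hck, List.mem_cons]

/-- A's fold builds exactly the dict with the distinct characters as keys (in
first-appearance order) and the running max of per-string counts as values. -/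
theorem pvInvA (l : List String) :
    l.foldl (fun a d =>
      let tmp : PySem.Dict Char Int :=
        d.toList.foldl (fun t letter => t.modify letter 0 (· + 1)) PySem.Dict.empty
      tmp.keys.foldl (fun a k => a.insert k (max (tmp.getD k 0) (a.getD k 0))) a)
      PySem.Dict.empty
    = pvMapOver (pvCharsOf l) (pvMOf l) := by
  induction l using List.reverseRecOn with
  | nil => simp [pvCharsOf, pvMapOver, PySem.Dict.empty]
  | append_singleton l d ih =>
    rw [List.foldl_append, List.foldl_cons, List.foldl_nil, ih]
    show (PySem.Dict.keys _).foldl _ _ = _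
    rw [← PySem.Dict.counter_eq_foldl, PySem.Dict.keys_counter]
    simp only [PySem.Dict.getD_counter]
    rw [pvMergeA (fun k => (d.toList.count k : Int)) _ (PySem.Set.nodup_ofList d.toList)
      (pvCharsOf l) (pvMOf l) ?h0]
    case h0 =>
      intro c hc
      apply pvMOf_zero
      intro s hs hcs
      exact hc ((pvMem_charsOf l c).mpr ⟨s, hs, hcs⟩)
    rw [pvUpdate_ofList, ← pvCharsOf_append]
    congr 1
    funext c
    rw [pvMOf_append]
    by_cases hcd : c ∈ d.toList
    · simp [PySem.Set.mem_ofList, hcd, max_comm]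
    · rw [if_neg (by simp [PySem.Set.mem_ofList, hcd])]
      rw [List.count_eq_zero.mpr hcd]
      simpa using max_eq_left (pvMOf_nonneg l c)

-- ===== VERDICT (by name: the statement is the Claim_ definition above) =====
theorem minNumBooths_spec : Claim_equal_minNumBooths := by
  intro demand _
  unfold Spec_minNumBooths
  rw [minNumBooths, minNumBooths_alt, pvInvA]
  simp only [PySem.Str.count_eq, String.toList_ofList, pvCount_singleton]
  show (pvMapOver (pvCharsOf demand) (pvMOf demand)).values.sum
      = (pvCharsOf demand).foldl (fun total c => total + pvMOf demand c) 0
  rw [pvMapOver, PySem.Dict.values, List.map_map]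
  have hcomp : ((fun x => x.2) ∘ fun c => ((c : Char), pvMOf demand c)) = pvMOf demand := rfl
  rw [hcomp, List.sum_eq_foldl, List.foldl_map]
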